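-- pv_equiv track=rewrite | github.com/vaidotasEP/Python-for-DQE | hw-functions-collections.py | list_of_dicts_2_single_dict
-- ===== SOURCE A (Python) =====
-- def list_of_dicts_2_single_dict(lst_of_dicts: list[dict], lst_of_keys: list[str]):
--     """
--         Return one common dict:
--         if dicts have same key, we will take max value, and rename key with dict number with max value
--         if key is only in one dict - take it as is,
--         example: {'a_1': 5, 'b': 7, 'c': 35, 'g_2': 42}
--
--         Args:
--             lst_of_dicts: list containing dictionaries
--             lst_of_keys: list containing letters, text strings with length = 1
--         Returns:
--             Return one common dict
--     """
--     new_dic = {}                        # define an empty dictionary, it will store our final result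
--     count_dic = {}                      # define an empty dictionary of lists, to store array index+1 where key is present
--     index_max_val_dic = {}              # define an empty dictionary, to store index+1 of dict where the key with
--                                         # largest value was spotted
--     for key in lst_of_keys:             # iterate through all unique keys
--         for i, dic in enumerate(lst_of_dicts):   # iterate through the list, with the index value and the dictionary
--             i += 1                      # increment index by 1, as we will use key suffixes numbering starting from 1
--             if dic.get(key, -1) > -1:   # check if given key exists in the given dictionary
--                 if count_dic.get(key, -1) == -1:  # we check if we have this key in our counter dictionary
--                     count_dic[key] = 1  # if not we add the key with the value 1, i.e. we met this key one time
--                 else: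
--                     count_dic[key] += 1  # if we already saw this key, we increment the corresponding counter
--             if dic.get(key, -1) > new_dic.get(key, -1):  # if the value is larger for a given key, we
--                 new_dic[key] = dic.get(key, -1)          # add/update the key value pair
--                 index_max_val_dic[key] = i               # add the index + 1 of the dict where larger value was spotted
--
--     # the loop below is for reassigning values to appropriately renamed keys, obsolete key value pairs get deleted
--     for key, val in count_dic.items():   # loop through the dict containing counts key was observed in different dicts
--         if val > 1:                      # if it is more than one time
--             new_dic[str(f'{key}_{index_max_val_dic[key]}')] = new_dic.pop(key)  # create renamed key and reassign value
--
--     return new_dic                       # return the single dictionary generated from the list of dicts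
-- ===== SOURCE B (Python) =====
-- def list_of_dicts_2_single_dict(lst_of_dicts: list[dict], lst_of_keys: list[str]):
--     # One pass over lst_of_dicts builds an index key -> [(dict_number, value), ...];
--     # each key in lst_of_keys is then resolved from the index instead of rescanning all dicts.
--     index = {}
--     for i, dic in enumerate(lst_of_dicts, 1):
--         for key, val in dic.items():
--             if val > -1:
--                 index.setdefault(key, []).append((i, val))
--     counts = {}
--     result = {}   # key -> (max value, number of the dict where the max was first seen)
--     for key in lst_of_keys:
--         hits = index.get(key, [])
--         if hits:
--             counts[key] = counts.get(key, 0) + len(hits)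
--             if key not in result:
--                 best = hits[0]
--                 for q in hits[1:]:
--                     if q[1] > best[1]:
--                         best = q
--                 result[key] = (best[1], best[0])
--     out = {}
--     for key, (v, _) in result.items():
--         out[key] = v
--     for key, c in counts.items():
--         if c > 1:
--             out[str(f'{key}_{result[key][1]}')] = out.pop(key)
--     return out
-- ===== Notes on version B (the rewrite author's own statement) =====
-- stated objective: faster
-- what changed: Instead of rescanning every dict for every key occurrence (A's nested key-by-dict loop maintaining three dicts incrementally), B makes a single pass over lst_of_dicts building an index key -> [(dict_number, value)] and then resolves each key in lst_of_keys directly from its hit list (count = len(hits), max and first-argmax by one scan of hits on the first occurrence), with the same final rename step.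
import Mathlib
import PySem

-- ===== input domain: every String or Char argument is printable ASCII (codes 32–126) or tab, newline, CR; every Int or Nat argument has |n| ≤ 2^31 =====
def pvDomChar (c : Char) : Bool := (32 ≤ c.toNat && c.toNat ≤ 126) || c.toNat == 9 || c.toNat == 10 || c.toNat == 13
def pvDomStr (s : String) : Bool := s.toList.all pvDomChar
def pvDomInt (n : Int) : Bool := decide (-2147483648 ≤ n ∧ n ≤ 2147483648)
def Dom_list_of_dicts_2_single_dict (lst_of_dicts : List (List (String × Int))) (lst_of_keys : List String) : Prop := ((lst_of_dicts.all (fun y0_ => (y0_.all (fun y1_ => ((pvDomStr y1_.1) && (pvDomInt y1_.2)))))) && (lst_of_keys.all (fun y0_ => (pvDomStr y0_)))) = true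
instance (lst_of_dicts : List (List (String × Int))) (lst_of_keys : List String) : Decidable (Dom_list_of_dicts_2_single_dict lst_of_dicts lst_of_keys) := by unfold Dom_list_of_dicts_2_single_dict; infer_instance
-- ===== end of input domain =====

-- B replaces A's nested key-by-dict rescans with a single indexing pass over the dicts
-- (key -> hit list), then resolves each key from its hit list; objective: faster.


-- ===== PORT A =====
-- one iteration of A's inner 'for i, dic in enumerate(lst_of_dicts)' loop, for a fixed key;
-- state = (new_dic, count_dic, index_max_val_dic)
def pvAstep (key : String)
    (st : PySem.Dict String Int × PySem.Dict String Int × PySem.Dict String Int)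
    (p : Int × List (String × Int)) :
    PySem.Dict String Int × PySem.Dict String Int × PySem.Dict String Int :=
  let i := p.1 + 1
  let dic : PySem.Dict String Int := PySem.Dict.mk p.2
  let new_dic := st.1
  let count_dic := st.2.1
  let index_max := st.2.2
  let count_dic :=
    if (-1 : Int) < dic.getD key (-1) then
      if count_dic.getD key (-1) == -1 then count_dic.insert key 1
      else count_dic.insert key (count_dic.getD key (-1) + 1)
    else count_dic
  if new_dic.getD key (-1) < dic.getD key (-1) then
    (new_dic.insert key (dic.getD key (-1)), count_dic, index_max.insert key i)
  else (new_dic, count_dic, index_max)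

def list_of_dicts_2_single_dict (lst_of_dicts : List (List (String × Int))) (lst_of_keys : List String) : List (String × Int) :=
  let st := lst_of_keys.foldl
    (fun st key => (PySem.List.enumerate lst_of_dicts).foldl (pvAstep key) st)
    ((PySem.Dict.empty, PySem.Dict.empty, PySem.Dict.empty) :
      PySem.Dict String Int × PySem.Dict String Int × PySem.Dict String Int)
  -- rename loop: for key, val in count_dic.items(): if val > 1: new_dic[f'{key}_{idx}'] = new_dic.pop(key)
  let new_dic := st.2.1.items.foldl
    (fun (nd : PySem.Dict String Int) kv =>
      if (1 : Int) < kv.2 then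
        match nd.pop? kv.1 with
        | some (v, nd') =>
            nd'.insert (kv.1 ++ "_" ++ PySem.Int.toStr ((st.2.2.get? kv.1).getD 0)) v
        | none => nd      -- KeyError in Python: unreachable (count > 1 ⟹ key ∈ new_dic)
      else nd) st.1
  new_dic.items

-- ===== PORT B =====
-- best = hits[0]; for q in hits[1:]: if q[1] > best[1]: best = q
def pvBbest (h : Int × Int) (t : List (Int × Int)) : Int × Int :=
  t.foldl (fun b q => if b.2 < q.2 then q else b) h

def list_of_dicts_2_single_dict_alt (lst_of_dicts : List (List (String × Int))) (lst_of_keys : List String) : List (String × Int) :=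
  -- index.setdefault(key, []).append((i, val)) for each entry with val > -1
  let index : PySem.Dict String (List (Int × Int)) :=
    (PySem.List.enumerate lst_of_dicts 1).foldl
      (fun ind p => (PySem.Dict.mk p.2).items.foldl
        (fun (ind : PySem.Dict String (List (Int × Int))) kv =>
          if (-1 : Int) < kv.2 then ind.modify kv.1 [] (· ++ [(p.1, kv.2)]) else ind) ind)
      PySem.Dict.empty
  -- state = (counts, result); result maps key to (max value, dict number of first max)
  let st := lst_of_keys.foldl
    (fun (st : PySem.Dict String Int × PySem.Dict String (Int × Int)) key =>
      match index.getD key [] with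
      | [] => st
      | h :: t =>
        let counts := st.1.insert key (st.1.getD key 0 + ((h :: t).length : Int))
        let result := if st.2.contains key then st.2
          else st.2.insert key ((pvBbest h t).2, (pvBbest h t).1)
        (counts, result))
    (PySem.Dict.empty, PySem.Dict.empty)
  let out := st.2.items.foldl
    (fun (o : PySem.Dict String Int) kv => o.insert kv.1 kv.2.1) PySem.Dict.empty
  let out := st.1.items.foldl
    (fun (o : PySem.Dict String Int) kv =>
      if (1 : Int) < kv.2 then
        match o.pop? kv.1 with
        | some (v, o') =>
            o'.insert (kv.1 ++ "_" ++ PySem.Int.toStr (st.2.getD kv.1 (0, 0)).2) v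
        | none => o       -- KeyError in Python: unreachable (count > 1 ⟹ key ∈ out)
      else o) out
  out.items

-- ===== PRECONDITION & SPEC =====
-- Pre_ requires each inner association list to have pairwise-distinct keys: a Python dict
-- cannot hold duplicate keys, so only such lists faithfully encode A's dict inputs.
def Pre_list_of_dicts_2_single_dict (lst_of_dicts : List (List (String × Int))) (lst_of_keys : List String) : Prop :=
  ∀ dic ∈ lst_of_dicts, (dic.map Prod.fst).Nodup
instance (lst_of_dicts : List (List (String × Int))) (lst_of_keys : List String) : Decidable (Pre_list_of_dicts_2_single_dict lst_of_dicts lst_of_keys) := by unfold Pre_list_of_dicts_2_single_dict; infer_instance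
def pvWitness_list_of_dicts_2_single_dict : (List (List (String × Int))) × List String :=
  ([[("a", 5), ("b", 7)], [("a", 3), ("g", 42)]], ["a", "b", "g"])

def Spec_list_of_dicts_2_single_dict (lst_of_dicts : List (List (String × Int))) (lst_of_keys : List String) (out : List (String × Int)) : Prop := out = list_of_dicts_2_single_dict_alt lst_of_dicts lst_of_keys
instance (lst_of_dicts : List (List (String × Int))) (lst_of_keys : List String) (out : List (String × Int)) : Decidable (Spec_list_of_dicts_2_single_dict lst_of_dicts lst_of_keys out) := by unfold Spec_list_of_dicts_2_single_dict; infer_instance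

-- ===== CLAIM (what is proved, stated in full; the proofs are below) =====
def Claim_equal_list_of_dicts_2_single_dict : Prop := ∀ (lst_of_dicts : List (List (String × Int))) (lst_of_keys : List String), Dom_list_of_dicts_2_single_dict lst_of_dicts lst_of_keys → Pre_list_of_dicts_2_single_dict lst_of_dicts lst_of_keys → Spec_list_of_dicts_2_single_dict lst_of_dicts lst_of_keys (list_of_dicts_2_single_dict lst_of_dicts lst_of_keys)

-- ===== LEMMAS AND PROOFS =====

-- value of key in one dict, with Python's get(key, -1)
def pvGetD (dic : List (String × Int)) (k : String) : Int := (PySem.Dict.mk dic).getD k (-1)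

-- the (1-based dict number, value) hit list of a key, enumerating from s
def pvHits (key : String) : List (List (String × Int)) → Int → List (Int × Int)
  | [], _ => []
  | d :: t, s => (if (-1 : Int) < pvGetD d key then [(s + 1, pvGetD d key)] else []) ++ pvHits key t (s + 1)

-- first strict-improvement maximum over a hit list, starting from threshold m
def pvBest (m : Int) : List (Int × Int) → Option (Int × Int)
  | [] => none
  | q :: t => if m < q.2 then some ((pvBest q.2 t).getD q) else pvBest m t

-- B's key-loop step with the index lookup replaced by its value pvHits
def pvBstep (lst : List (List (String × Int)))
    (st : PySem.Dict String Int × PySem.Dict String (Int × Int)) (key : String) :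
    PySem.Dict String Int × PySem.Dict String (Int × Int) :=
  match pvHits key lst 0 with
  | [] => st
  | h :: t =>
    (st.1.insert key (st.1.getD key 0 + ((h :: t).length : Int)),
     if st.2.contains key then st.2
     else st.2.insert key ((pvBbest h t).2, (pvBbest h t).1))

-- the correspondence between A's loop state and B's loop state
def pvInv (lst : List (List (String × Int)))
    (a : PySem.Dict String Int × PySem.Dict String Int × PySem.Dict String Int)
    (b : PySem.Dict String Int × PySem.Dict String (Int × Int)) : Prop :=
  a.2.1 = b.1 ∧
  a.1.items = b.2.items.map (fun p => (p.1, p.2.1)) ∧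
  (∀ k, a.2.2.get? k = (b.2.get? k).map (fun p => p.2)) ∧
  (∀ k p, b.2.get? k = some p → pvBest (-1) (pvHits k lst 0) = some (p.2, p.1)) ∧
  (∀ k v, b.1.get? k = some v → 1 ≤ v) ∧
  (∀ k, b.1.contains k = b.2.contains k) ∧
  b.1.keys.Nodup ∧ b.2.keys.Nodup

theorem pvBest_getD (t : List (Int × Int)) (h : Int × Int) :
    (pvBest h.2 t).getD h = pvBbest h t := by
  induction t generalizing h with
  | nil => simp [pvBest, pvBbest]
  | cons q t ih =>
    by_cases hq : h.2 < q.2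
    · simp [pvBest, pvBbest, hq, List.foldl_cons]
      have := ih q
      simp [pvBbest] at this
      simpa using this
    · simp [pvBest, pvBbest, hq, List.foldl_cons]
      have := ih h
      simp [pvBbest] at this
      simpa using this

theorem pvBest_none_iff (m : Int) (l : List (Int × Int)) :
    pvBest m l = none ↔ ∀ r ∈ l, r.2 ≤ m := by
  induction l generalizing m with
  | nil => simp [pvBest]
  | cons p t ih =>
    by_cases hp : m < p.2
    · simp only [pvBest, hp, if_pos]
      constructor
      · intro h; cases pvBest p.2 t <;> simp at h
      · intro h; exact absurd (h p (by simp)) (not_le.mpr hp)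
    · simp only [pvBest, hp, if_neg, not_false_iff, ih]
      constructor
      · intro h r hr
        rcases List.mem_cons.mp hr with hr | hr
        · subst hr; exact not_lt.mp hp
        · exact h r hr
      · intro h r hr; exact h r (by simp [hr])

theorem pvBest_le (m : Int) (l : List (Int × Int)) (q : Int × Int)
    (hq : pvBest m l = some q) : m < q.2 ∧ ∀ r ∈ l, r.2 ≤ q.2 := by
  induction l generalizing m with
  | nil => simp [pvBest] at hq
  | cons p t ih =>
    by_cases hp : m < p.2
    · simp [pvBest, hp] at hq
      rcases hb : pvBest p.2 t with _ | q'
      · rw [hb] at hq; simp at hq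
        subst hq
        refine ⟨hp, ?_⟩
        intro r hr
        rcases List.mem_cons.mp hr with hr | hr
        · simp [hr]
        · exact (pvBest_none_iff _ _).mp hb r hr
      · rw [hb] at hq; simp at hq
        subst hq
        have := ih _ hb
        exact ⟨lt_trans hp this.1, by
          intro r hr
          rcases List.mem_cons.mp hr with hr | hr
          · subst hr; exact le_of_lt this.1
          · exact this.2 r hr⟩
    · simp [pvBest, hp] at hq
      have := ih _ hq
      refine ⟨this.1, ?_⟩
      intro r hr
      rcases List.mem_cons.mp hr with hr | hr
      · subst hr; exact le_trans (not_lt.mp hp) (le_of_lt this.1)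
      · exact this.2 r hr

theorem pvBest_none (m : Int) (l : List (Int × Int)) (h : ∀ r ∈ l, r.2 ≤ m) :
    pvBest m l = none := (pvBest_none_iff m l).mpr h

theorem pvHits_pos (key : String) (lst : List (List (String × Int))) (s : Int) :
    ∀ q ∈ pvHits key lst s, (-1 : Int) < q.2 := by
  induction lst generalizing s with
  | nil => simp [pvHits]
  | cons d t ih =>
    intro q hq
    simp only [pvHits, List.mem_append] at hq
    rcases hq with hq | hq
    · split at hq <;> simp_all
    · exact ih (s+1) q hq

theorem pvAinner (key : String) (lst : List (List (String × Int))) (s : Int)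
    (nd cd im : PySem.Dict String Int)
    (hnd : -1 ≤ nd.getD key (-1)) (hcd : -1 ≤ cd.getD key (-1)) :
    (PySem.List.enumerate lst s).foldl (pvAstep key) (nd, cd, im) =
      ((match pvBest (nd.getD key (-1)) (pvHits key lst s) with
        | none => nd | some q => nd.insert key q.2),
       (if pvHits key lst s = [] then cd
        else cd.insert key ((if cd.getD key (-1) == -1 then 0 else cd.getD key (-1)) +
          ((pvHits key lst s).length : Int))),
       (match pvBest (nd.getD key (-1)) (pvHits key lst s) with
        | none => im | some q => im.insert key q.1)) := by
  induction lst generalizing s nd cd im with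
  | nil =>
    simp [PySem.List.enumerate_nil, pvHits, pvBest]
  | cons d t ih =>
    rw [PySem.List.enumerate_cons, List.foldl_cons]
    by_cases hv : (-1 : Int) < pvGetD d key
    · -- a hit in dict d
      have hhits : pvHits key (d :: t) s = (s + 1, pvGetD d key) :: pvHits key t (s + 1) := by
        simp [pvHits, hv]
      set base : Int := if cd.getD key (-1) == -1 then 0 else cd.getD key (-1) with hbase
      have hbase0 : 0 ≤ base := by
        rw [hbase]; by_cases hb : cd.getD key (-1) = -1 <;> simp [hb] <;> omega
      have hcd1 : (if cd.getD key (-1) == -1 then cd.insert key 1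
          else cd.insert key (cd.getD key (-1) + 1)) = cd.insert key (base + 1) := by
        rw [hbase]; by_cases hb : cd.getD key (-1) = -1 <;> simp [hb]
      have hcdg : (cd.insert key (base + 1)).getD key (-1) = base + 1 :=
        PySem.Dict.getD_insert_self _ _ _ _
      have hcdbeq : ((cd.insert key (base + 1)).getD key (-1) == -1) = false := by
        rw [hcdg]; simp; omega
      by_cases hm : nd.getD key (-1) < pvGetD d key
      · -- also a new max
        have hstep : pvAstep key (nd, cd, im) (s, d) =
            (nd.insert key (pvGetD d key), cd.insert key (base + 1), im.insert key (s + 1)) := by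
          simp only [pvAstep, pvGetD] at *
          rw [if_pos hv, hcd1, if_pos hm]
        have hbestc : pvBest (nd.getD key (-1)) ((s + 1, pvGetD d key) :: pvHits key t (s + 1)) =
            some ((pvBest (pvGetD d key) (pvHits key t (s + 1))).getD (s + 1, pvGetD d key)) := by
          simp [pvBest, hm]
        rw [hstep, ih (s+1) _ _ _ (by rw [PySem.Dict.getD_insert_self]; omega) (by rw [hcdg]; omega),
          hhits, hbestc]
        simp only [Prod.mk.injEq]
        refine ⟨?_, ?_, ?_⟩
        · simp only [PySem.Dict.getD_insert_self]
          rcases hb : pvBest (pvGetD d key) (pvHits key t (s + 1)) with _ | q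
          · simp
          · simp [PySem.Dict.insert_insert_self]
        · rcases hrest : pvHits key t (s + 1) with _ | ⟨q, r⟩
          · simp
          · rw [if_neg (List.cons_ne_nil _ _), if_neg (List.cons_ne_nil _ _), hcdbeq, hcdg]
            simp only [Bool.false_eq_true, if_false, PySem.Dict.insert_insert_self]
            congr 1
            simp only [List.length_cons]
            push_cast
            omega
        · simp only [PySem.Dict.getD_insert_self]
          rcases hb : pvBest (pvGetD d key) (pvHits key t (s + 1)) with _ | q
          · simp
          · simp [PySem.Dict.insert_insert_self]
      · -- hit but not a new max
        have hstep : pvAstep key (nd, cd, im) (s, d) =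
            (nd, cd.insert key (base + 1), im) := by
          simp only [pvAstep, pvGetD] at *
          rw [if_pos hv, hcd1, if_neg hm]
        have hbestc : pvBest (nd.getD key (-1)) ((s + 1, pvGetD d key) :: pvHits key t (s + 1)) =
            pvBest (nd.getD key (-1)) (pvHits key t (s + 1)) := by
          simp [pvBest, hm]
        rw [hstep, ih (s+1) _ _ _ hnd (by rw [hcdg]; omega), hhits, hbestc]
        simp only [Prod.mk.injEq]
        refine ⟨trivial, ?_, trivial⟩
        rcases hrest : pvHits key t (s + 1) with _ | ⟨q, r⟩
        · simp
        · rw [if_neg (List.cons_ne_nil _ _), if_neg (List.cons_ne_nil _ _), hcdbeq, hcdg]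
          simp only [Bool.false_eq_true, if_false, PySem.Dict.insert_insert_self]
          congr 1
          simp only [List.length_cons]
          push_cast
          omega
    · -- no hit
      have hhits : pvHits key (d :: t) s = pvHits key t (s + 1) := by
        simp [pvHits, hv]
      have hstep : pvAstep key (nd, cd, im) (s, d) = (nd, cd, im) := by
        simp only [pvAstep, pvGetD] at *
        rw [if_neg hv, if_neg (by omega)]
      rw [hstep, ih (s+1) _ _ _ hnd hcd, hhits]

theorem pvGetOfMap (l : List (String × (Int × Int))) (k : String) :
    (PySem.Dict.mk (l.map (fun p => (p.1, p.2.1)))).get? k =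
      ((PySem.Dict.mk l).get? k).map (fun p => p.1) := by
  induction l with
  | nil => simp [PySem.Dict.get?]
  | cons p t ih =>
    obtain ⟨k0, v0⟩ := p
    simp only [List.map_cons, PySem.Dict.get?_mk_cons]
    by_cases hk : k0 == k
    · simp [hk]
    · simp only [hk, Bool.false_eq_true, if_false, ih]

theorem pvInner5a (d : List (String × Int)) (i : Int) (key : String)
    (ind : PySem.Dict String (List (Int × Int))) :
    (d.foldl (fun (ind : PySem.Dict String (List (Int × Int))) kv =>
        if (-1 : Int) < kv.2 then ind.modify kv.1 [] (· ++ [(i, kv.2)]) else ind) ind).getD key [] =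
      ind.getD key [] ++
        (d.filter (fun kv => decide ((-1 : Int) < kv.2) && (kv.1 == key))).map (fun kv => (i, kv.2)) := by
  induction d generalizing ind with
  | nil => simp
  | cons kv t ih =>
    by_cases hv : (-1 : Int) < kv.2
    · rw [List.foldl_cons, if_pos hv, ih]
      by_cases hk : kv.1 = key
      · subst hk
        rw [PySem.Dict.getD_modify_self]
        simp [hv]
      · rw [PySem.Dict.getD_modify_of_ne _ _ _ (Ne.symm hk)]
        simp [hv, hk]
    · rw [List.foldl_cons, if_neg hv, ih]
      simp [hv]

theorem pvFilterNil (d : List (String × Int)) (key : String)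
    (h : key ∉ d.map Prod.fst) :
    d.filter (fun kv => decide ((-1 : Int) < kv.2) && (kv.1 == key)) = [] := by
  rw [List.filter_eq_nil_iff]
  intro kv hkv
  have hmem : kv.1 ∈ d.map Prod.fst := List.mem_map_of_mem (f := Prod.fst) hkv
  have : kv.1 ≠ key := by
    intro he
    rw [he] at hmem
    exact h hmem
  simp [this]

theorem pvInner5b (d : List (String × Int)) (i : Int) (key : String)
    (hnd : (d.map Prod.fst).Nodup) :
    (d.filter (fun kv => decide ((-1 : Int) < kv.2) && (kv.1 == key))).map (fun kv => (i, kv.2)) =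
      if (-1 : Int) < pvGetD d key then [(i, pvGetD d key)] else [] := by
  induction d with
  | nil => simp [pvGetD, PySem.Dict.get?, PySem.Dict.getD_eq_get?_getD]
  | cons kv t ih =>
    obtain ⟨k0, v0⟩ := kv
    simp only [List.map_cons, List.nodup_cons] at hnd
    by_cases hk : k0 = key
    · subst hk
      have hg : pvGetD ((k0, v0) :: t) k0 = v0 := by
        simp [pvGetD, PySem.Dict.getD_eq_get?_getD, PySem.Dict.get?_mk_cons]
      rw [hg, List.filter_cons, pvFilterNil t k0 hnd.1]
      by_cases hv : (-1 : Int) < v0 <;> simp [hv]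
    · have hg : pvGetD ((k0, v0) :: t) key = pvGetD t key := by
        simp [pvGetD, PySem.Dict.getD_eq_get?_getD, PySem.Dict.get?_mk_cons, hk]
      rw [hg, List.filter_cons]
      simp only [show ((k0, v0).1 == key) = false by simpa using hk, Bool.and_false, if_false]
      exact ih hnd.2

theorem pvBindexGen (key : String) (lst : List (List (String × Int)))
    (hpre : ∀ dic ∈ lst, (dic.map Prod.fst).Nodup) (s : Int)
    (ind : PySem.Dict String (List (Int × Int))) :
    ((PySem.List.enumerate lst (s + 1)).foldl
      (fun ind p => (PySem.Dict.mk p.2).items.foldl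
        (fun (ind : PySem.Dict String (List (Int × Int))) kv =>
          if (-1 : Int) < kv.2 then ind.modify kv.1 [] (· ++ [(p.1, kv.2)]) else ind) ind)
      ind).getD key [] = ind.getD key [] ++ pvHits key lst s := by
  induction lst generalizing s ind with
  | nil => simp [PySem.List.enumerate_nil, pvHits]
  | cons d t ih =>
    rw [PySem.List.enumerate_cons, List.foldl_cons]
    have hd := hpre d (by simp)
    have hrest : ∀ dic ∈ t, (dic.map Prod.fst).Nodup := fun dic hdic => hpre dic (by simp [hdic])
    rw [show (PySem.Dict.mk d).items = d from rfl,
      ih hrest (s + 1), pvInner5a, pvInner5b d (s + 1) key hd]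
    simp [pvHits, List.append_assoc]

theorem pvStep (lst : List (List (String × Int))) (key : String)
    (a : PySem.Dict String Int × PySem.Dict String Int × PySem.Dict String Int)
    (b : PySem.Dict String Int × PySem.Dict String (Int × Int))
    (hinv : pvInv lst a b) :
    pvInv lst ((PySem.List.enumerate lst).foldl (pvAstep key) a) (pvBstep lst b key) := by
  obtain ⟨nd, cdA, im⟩ := a
  obtain ⟨cdA, res⟩ := b
  obtain ⟨h1, h2, h3, h4, h5, h6, h7, h8⟩ := hinv
  simp only at h1 h2 h3 h4 h5 h6 h7 h8
  subst h1
  have ndget : ∀ k, nd.get? k = (res.get? k).map (fun p => p.1) := by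
    intro k
    rw [PySem.Dict.ext h2, pvGetOfMap]
  have hnd : -1 ≤ nd.getD key (-1) := by
    rw [PySem.Dict.getD_eq_get?_getD, ndget]
    rcases hq : res.get? key with _ | p
    · simp
    · have := (pvBest_le _ _ _ (h4 key p hq)).1
      simp only [Option.map_some, Option.getD_some]
      omega
  have hcd : -1 ≤ cdA.getD key (-1) := by
    rw [PySem.Dict.getD_eq_get?_getD]
    rcases hq : cdA.get? key with _ | v
    · simp
    · have := h5 key v hq
      simp only [Option.getD_some]
      omega
  have hA := pvAinner key lst 0 nd cdA im hnd hcd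
  rcases hhit : pvHits key lst 0 with _ | ⟨h, t⟩
  · -- no dict contains key: both sides unchanged
    rw [hA, hhit]
    simp only [pvBest, if_pos rfl, pvBstep, hhit]
    exact ⟨rfl, h2, h3, h4, h5, h6, h7, h8⟩
  · have hlen1 : (1 : Int) ≤ (((h :: t).length : Nat) : Int) := by
      simp only [List.length_cons]
      push_cast
      omega
    have hpos : (-1 : Int) < h.2 := pvHits_pos key lst 0 h (by rw [hhit]; simp)
    have hbest : pvBest (-1) (pvHits key lst 0) = some (pvBbest h t) := by
      rw [hhit]
      show (if (-1 : Int) < h.2 then some ((pvBest h.2 t).getD h) else pvBest (-1) t) = _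
      rw [if_pos hpos, pvBest_getD]
    by_cases hres : res.contains key
    · -- key seen before: A's max scan finds nothing new; only the counts grow
      have hp : ∃ p, res.get? key = some p := by
        rw [PySem.Dict.contains_eq_isSome_get?] at hres
        rcases h' : res.get? key with _ | p
        · rw [h'] at hres; simp at hres
        · exact ⟨p, rfl⟩
      obtain ⟨p, hp⟩ := hp
      have hm : nd.getD key (-1) = p.1 := by
        rw [PySem.Dict.getD_eq_get?_getD, ndget, hp]
        rfl
      have hnone : pvBest (nd.getD key (-1)) (pvHits key lst 0) = none := by
        apply pvBest_none
        intro r hr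
        have := (pvBest_le _ _ _ (h4 key p hp)).2 r hr
        rw [hm]
        exact this
      have hcnt : ∃ c, cdA.get? key = some c := by
        have h6k := h6 key
        rw [hres, PySem.Dict.contains_eq_isSome_get?] at h6k
        rcases h' : cdA.get? key with _ | c
        · rw [h'] at h6k; simp at h6k
        · exact ⟨c, rfl⟩
      obtain ⟨c, hc⟩ := hcnt
      have hc1 : 1 ≤ c := h5 key c hc
      have hcg : cdA.getD key (-1) = c := by
        rw [PySem.Dict.getD_eq_get?_getD, hc]
        rfl
      have hbeq : (cdA.getD key (-1) == -1) = false := by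
        rw [hcg]; simp; omega
      have hcg0 : cdA.getD key 0 = c := by
        rw [PySem.Dict.getD_eq_get?_getD, hc]
        rfl
      have hif : (if cdA.getD key (-1) == -1 then (0 : Int) else cdA.getD key (-1)) = c := by
        rw [hbeq]
        simp [hcg]
      rw [hA, hnone, hhit]
      simp only [pvBstep, hhit, hres, if_neg (List.cons_ne_nil _ _), hif, hcg0, if_true]
      refine ⟨rfl, h2, h3, h4, ?_, ?_, PySem.Dict.nodup_keys_insert _ _ _ h7, h8⟩
      · intro k v hkv
        rw [PySem.Dict.get?_insert] at hkv
        by_cases hkk : k = key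
        · rw [if_pos hkk] at hkv
          have : v = c + ((h :: t).length : Int) := by simpa using hkv.symm
          omega
        · exact h5 k v (by rwa [if_neg hkk] at hkv)
      · intro k
        rw [PySem.Dict.contains_insert, h6]
        by_cases hkk : k = key
        · simp [hkk, hres]
        · simp [hkk]
    · -- first occurrence of key with hits: both sides record count, max and argmax
      have hresf : res.contains key = false := by simpa using hres
      have hp : res.get? key = none := by
        rw [PySem.Dict.contains_eq_isSome_get?] at hresf
        rcases h' : res.get? key with _ | p
        · rfl
        · rw [h'] at hresf; simp at hresf
      have hm : nd.getD key (-1) = -1 := by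
        rw [PySem.Dict.getD_eq_get?_getD, ndget, hp]
        rfl
      have hcn : cdA.get? key = none := by
        have h6k := h6 key
        rw [hresf, PySem.Dict.contains_eq_isSome_get?] at h6k
        rcases h' : cdA.get? key with _ | c
        · rfl
        · rw [h'] at h6k; simp at h6k
      have hcg : cdA.getD key (-1) = -1 := by
        rw [PySem.Dict.getD_eq_get?_getD, hcn]
        rfl
      have hbeq : (cdA.getD key (-1) == -1) = true := by rw [hcg]; simp
      have hcg0 : cdA.getD key 0 = 0 := by
        rw [PySem.Dict.getD_eq_get?_getD, hcn]
        rfl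
      have hndc : nd.contains key = false := by
        rw [PySem.Dict.contains_eq_isSome_get?, ndget, hp]
        rfl
      have hif : (if cdA.getD key (-1) == -1 then (0 : Int) else cdA.getD key (-1)) = 0 := by
        rw [hbeq]
        simp
      rw [hA, hm, hbest, hhit]
      simp only [pvBstep, hhit, hresf, Bool.false_eq_true, if_false,
        if_neg (List.cons_ne_nil _ _), hif, hcg0]
      refine ⟨rfl, ?_, ?_, ?_, ?_, ?_, PySem.Dict.nodup_keys_insert _ _ _ h7,
        PySem.Dict.nodup_keys_insert _ _ _ h8⟩
      · rw [PySem.Dict.items_insert_of_not_contains _ _ hndc,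
          PySem.Dict.items_insert_of_not_contains _ _ hresf, List.map_append, h2]
        rfl
      · intro k
        rw [PySem.Dict.get?_insert, PySem.Dict.get?_insert]
        by_cases hkk : k = key
        · rw [if_pos hkk, if_pos hkk]
          rfl
        · rw [if_neg hkk, if_neg hkk, h3]
      · intro k p hkp
        rw [PySem.Dict.get?_insert] at hkp
        by_cases hkk : k = key
        · subst hkk
          rw [if_pos rfl] at hkp
          have hpv : p = ((pvBbest h t).2, (pvBbest h t).1) := by simpa using hkp.symm
          rw [hpv, hhit] at *
          simp only
          rw [← hhit, hbest]
        · exact h4 k p (by rwa [if_neg hkk] at hkp)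
      · intro k v hkv
        rw [PySem.Dict.get?_insert] at hkv
        by_cases hkk : k = key
        · rw [if_pos hkk] at hkv
          have : v = 0 + ((h :: t).length : Int) := by simpa using hkv.symm
          omega
        · exact h5 k v (by rwa [if_neg hkk] at hkv)
      · intro k
        rw [PySem.Dict.contains_insert, PySem.Dict.contains_insert, h6]

theorem pvFoldInv (lst : List (List (String × Int))) (ks : List String)
    (a : PySem.Dict String Int × PySem.Dict String Int × PySem.Dict String Int)
    (b : PySem.Dict String Int × PySem.Dict String (Int × Int)) (hinv : pvInv lst a b) :
    pvInv lst (ks.foldl (fun st key => (PySem.List.enumerate lst).foldl (pvAstep key) st) a)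
      (ks.foldl (pvBstep lst) b) := by
  induction ks generalizing a b with
  | nil => exact hinv
  | cons k ks ih => exact ih _ _ (pvStep lst k a b hinv)

theorem pvFinal (lst : List (List (String × Int)))
    (A : PySem.Dict String Int × PySem.Dict String Int × PySem.Dict String Int)
    (B : PySem.Dict String Int × PySem.Dict String (Int × Int))
    (hinv : pvInv lst A B) :
    (A.2.1.items.foldl
      (fun (nd : PySem.Dict String Int) kv =>
        if (1 : Int) < kv.2 then
          match nd.pop? kv.1 with
          | some (v, nd') => nd'.insert (kv.1 ++ "_" ++ PySem.Int.toStr ((A.2.2.get? kv.1).getD 0)) v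
          | none => nd
        else nd) A.1).items =
    (B.1.items.foldl
      (fun (o : PySem.Dict String Int) kv =>
        if (1 : Int) < kv.2 then
          match o.pop? kv.1 with
          | some (v, o') => o'.insert (kv.1 ++ "_" ++ PySem.Int.toStr ((B.2.getD kv.1 (0, 0)).2)) v
          | none => o
        else o)
      (B.2.items.foldl (fun (o : PySem.Dict String Int) kv => o.insert kv.1 kv.2.1) PySem.Dict.empty)).items := by
  obtain ⟨nd, cdA, im⟩ := A
  obtain ⟨cnt, res⟩ := B
  obtain ⟨h1, h2, h3, h4, h5, h6, h7, h8⟩ := hinv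
  simp only at h1 h2 h3 h4 h5 h6 h7 h8 ⊢
  subst h1
  -- the reconstruction loop of B rebuilds exactly A's new_dic
  have hout0 : res.items.foldl (fun (o : PySem.Dict String Int) kv => o.insert kv.1 kv.2.1)
      PySem.Dict.empty = nd := by
    apply PySem.Dict.ext
    rw [PySem.Dict.items_foldl_insert_fresh res.items (fun kv => kv.1) (fun kv => kv.2.1)
      PySem.Dict.empty (fun a _ => PySem.Dict.contains_empty _) h8, h2]
    rfl
  -- the two rename loops are the same fold
  have hkeyeq : ∀ k : String, ((im.get? k).getD 0) = ((res.getD k (0, 0)).2) := by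
    intro k
    rw [h3 k, PySem.Dict.getD_eq_get?_getD]
    rcases res.get? k with _ | p
    · rfl
    · rfl
  have hfun : (fun (nd : PySem.Dict String Int) (kv : String × Int) =>
        if (1 : Int) < kv.2 then
          match nd.pop? kv.1 with
          | some (v, nd') => nd'.insert (kv.1 ++ "_" ++ PySem.Int.toStr ((im.get? kv.1).getD 0)) v
          | none => nd
        else nd) =
      (fun (o : PySem.Dict String Int) (kv : String × Int) =>
        if (1 : Int) < kv.2 then
          match o.pop? kv.1 with
          | some (v, o') => o'.insert (kv.1 ++ "_" ++ PySem.Int.toStr ((res.getD kv.1 (0, 0)).2)) v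
          | none => o
        else o) := by
    funext o kv
    rw [hkeyeq kv.1]
  rw [hout0, hfun]

theorem pvMain (lst : List (List (String × Int))) (keys : List String)
    (hpre : ∀ dic ∈ lst, (dic.map Prod.fst).Nodup) :
    list_of_dicts_2_single_dict lst keys = list_of_dicts_2_single_dict_alt lst keys := by
  have hindex : ∀ key : String,
      ((PySem.List.enumerate lst 1).foldl
        (fun ind p => (PySem.Dict.mk p.2).items.foldl
          (fun (ind : PySem.Dict String (List (Int × Int))) kv =>
            if (-1 : Int) < kv.2 then ind.modify kv.1 [] (· ++ [(p.1, kv.2)]) else ind) ind)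
        PySem.Dict.empty).getD key [] = pvHits key lst 0 := by
    intro key
    have h := pvBindexGen key lst hpre 0 PySem.Dict.empty
    rw [show ((0 : Int) + 1) = 1 from by norm_num] at h
    simpa using h
  have hinv0 : pvInv lst (PySem.Dict.empty, PySem.Dict.empty, PySem.Dict.empty)
      (PySem.Dict.empty, PySem.Dict.empty) := by
    refine ⟨rfl, rfl, ?_, ?_, ?_, ?_, ?_, ?_⟩
    · intro k; simp [PySem.Dict.get?_empty]
    · intro k p hk; rw [PySem.Dict.get?_empty] at hk; cases hk
    · intro k v hk; rw [PySem.Dict.get?_empty] at hk; cases hk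
    · intro k; rfl
    · exact PySem.Dict.nodup_keys_empty
    · exact PySem.Dict.nodup_keys_empty
  dsimp only [list_of_dicts_2_single_dict, list_of_dicts_2_single_dict_alt]
  simp only [hindex]
  have hstepfun : (fun (st : PySem.Dict String Int × PySem.Dict String (Int × Int)) key =>
      match pvHits key lst 0 with
      | [] => st
      | h :: t =>
        (st.1.insert key (st.1.getD key 0 + ((h :: t).length : Int)),
         if st.2.contains key then st.2
         else st.2.insert key ((pvBbest h t).2, (pvBbest h t).1))) = pvBstep lst := by
    funext st key
    rfl
  rw [hstepfun]
  exact pvFinal lst _ _ (pvFoldInv lst keys _ _ hinv0)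

-- ===== VERDICT (by name: the statement is the Claim_ definition above) =====
theorem list_of_dicts_2_single_dict_spec : Claim_equal_list_of_dicts_2_single_dict := by
  intro lst keys _ hpre
  exact pvMain lst keys hpre
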